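-- pv_equiv track=rewrite | github.com/ndbellew/KompyuterM3chakrs | LearningPython/keren/yingyangstones/yingyangstones.py | answer
-- ===== SOURCE A (Python) =====
-- def answer(stones):
--     whites, blacks = 0,0
--     for stone in stones:
--         if stone == "W":
--             whites += 1
--         else:
--             blacks += 1
--
--     if whites > blacks or blacks > whites:
--         return 0
--     else:
--         return 1
-- ===== SOURCE B (Python) =====
-- def answer(stones):
--     stack = []
--     for stone in stones:
--         w = stone == "W"
--         if stack and stack[-1] != w:
--             stack.pop()
--         else:
--             stack.append(w)
--     return 1 if not stack else 0
-- ===== Notes on version B (the rewrite author's own statement) =====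
-- stated objective: alternative
-- what changed: Replaces the two-counter tally-and-compare with pair cancellation: a stack of pending colors where each stone of the opposite kind cancels (pops) a pending one, returning 1 iff the stack ends empty.
import Mathlib
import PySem

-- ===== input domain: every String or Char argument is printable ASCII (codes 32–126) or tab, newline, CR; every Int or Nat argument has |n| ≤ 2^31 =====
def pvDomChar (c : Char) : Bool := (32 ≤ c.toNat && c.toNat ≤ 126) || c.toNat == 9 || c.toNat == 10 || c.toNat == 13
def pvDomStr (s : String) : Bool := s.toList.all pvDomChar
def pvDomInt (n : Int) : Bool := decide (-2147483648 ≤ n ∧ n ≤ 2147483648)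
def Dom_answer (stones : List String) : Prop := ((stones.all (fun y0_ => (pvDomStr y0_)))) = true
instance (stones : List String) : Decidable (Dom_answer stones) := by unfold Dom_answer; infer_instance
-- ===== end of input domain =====

-- B replaces A's two-counter tally-and-compare with pair cancellation on a stack: each stone of
-- the opposite kind pops a pending one; equal W/B counts iff the stack ends empty (alternative algorithm, same cost).


-- ===== PORT A =====
-- loop: whites,blacks accumulated over stones, then compare
def answerLoop (stones : List String) (whites blacks : Int) : Int × Int :=
  match stones with
  | [] => (whites, blacks)
  | stone :: rest =>
      if stone = "W" then answerLoop rest (whites + 1) blacks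
      else answerLoop rest whites (blacks + 1)

def answer (stones : List String) : Int :=
  let wb := answerLoop stones 0 0
  if wb.1 > wb.2 ∨ wb.2 > wb.1 then 0 else 1

-- ===== PORT B =====
-- B's loop body: if the stack is nonempty and its top differs from w, pop; else push w
def altStep (w : Bool) (stack : List Bool) : List Bool :=
  match stack with
  | t :: ts => if t ≠ w then ts else w :: t :: ts
  | [] => [w]

-- B's loop over the stones, threading the stack (top = list head)
def altLoop (stones : List String) (stack : List Bool) : List Bool :=
  match stones with
  | [] => stack
  | stone :: rest => altLoop rest (altStep (decide (stone = "W")) stack)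

def answer_alt (stones : List String) : Int :=
  if altLoop stones [] = [] then 1 else 0

-- ===== PRECONDITION & SPEC =====
def Spec_answer (stones : List String) (out : Int) : Prop := out = answer_alt stones
instance (stones : List String) (out : Int) : Decidable (Spec_answer stones out) := by unfold Spec_answer; infer_instance

-- ===== CLAIM (what is proved, stated in full; the proofs are below) =====
def Claim_equal_answer : Prop := ∀ (stones : List String), Dom_answer stones → Spec_answer stones (answer stones)

-- ===== LEMMAS AND PROOFS =====

-- signed balance of the stack (+1 per true, -1 per false)
def pvBal : List Bool → Int
  | [] => 0
  | x :: t => (if x then 1 else -1) + pvBal t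

-- the stack is always homogeneous (all elements equal)
def pvHomog (l : List Bool) : Prop := ∀ x ∈ l, ∀ y ∈ l, x = y

lemma answerLoop_eq (stones : List String) (w b : Int) :
    answerLoop stones w b = (w + (stones.count "W" : Int),
      b + ((stones.length : Int) - (stones.count "W" : Int))) := by
  induction stones generalizing w b with
  | nil => simp [answerLoop]
  | cons s rest ih =>
      simp only [answerLoop, List.count_cons]
      by_cases h : s = "W" <;> simp [h, ih] <;> omega

lemma altStep_spec (w : Bool) (st : List Bool) (hh : pvHomog st) :
    pvHomog (altStep w st) ∧
      pvBal (altStep w st) = pvBal st + (if w then 1 else -1) := by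
  match st with
  | [] =>
      refine ⟨?_, by simp [altStep, pvBal]⟩
      intro x hx y hy; simp_all [altStep]
  | t :: ts =>
      by_cases ht : t = w
      · subst ht
        refine ⟨?_, by cases t <;> simp [altStep, pvBal] <;> ring⟩
        have hall : ∀ z ∈ altStep t (t :: ts), z = t := by
          intro z hz
          simp [altStep] at hz
          rcases hz with rfl | hz
          · rfl
          · exact hh z (by simp [hz]) t (by simp)
        intro x hx y hy
        rw [hall x hx, hall y hy]
      · constructor
        · intro x hx y hy
          simp only [altStep, ne_eq, ht, not_false_eq_true, if_pos] at hx hy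
          exact hh x (by simp [hx]) y (by simp [hy])
        · have hv : (if t then (1:Int) else -1) = - (if w then 1 else -1) := by
            cases t <;> cases w <;> simp_all
          simp only [altStep, ne_eq, ht, not_false_eq_true, if_pos]
          rw [show pvBal (t :: ts) = (if t then (1:Int) else -1) + pvBal ts from rfl, hv]
          ring

lemma altLoop_spec (stones : List String) (st : List Bool) (hh : pvHomog st) :
    pvHomog (altLoop stones st) ∧
      pvBal (altLoop stones st)
        = pvBal st + 2 * (stones.count "W" : Int) - stones.length := by
  induction stones generalizing st with
  | nil => simpa [altLoop] using hh
  | cons s rest ih =>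
      have hstep := altStep_spec (decide (s = "W")) st hh
      have := ih (altStep (decide (s = "W")) st) hstep.1
      refine ⟨this.1, ?_⟩
      simp only [altLoop]
      rw [this.2, hstep.2, List.count_cons]
      by_cases h : s = "W" <;> simp [h] <;> push_cast <;> ring

lemma pvBal_homog (l : List Bool) (hh : pvHomog l) : pvBal l = 0 ↔ l = [] := by
  constructor
  · intro h0
    cases l with
    | nil => rfl
    | cons h t =>
        exfalso
        have hall : ∀ z ∈ t, z = h := fun z hz => hh z (by simp [hz]) h (by simp)
        have hlin : pvBal (h :: t) = (if h then (1:Int) else -1) * (t.length + 1) := by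
          clear hh h0
          induction t with
          | nil => cases h <;> simp [pvBal]
          | cons a t2 ih =>
              have ha : a = h := hall a (by simp)
              have h2 := ih (fun z hz => hall z (by simp [hz]))
              rw [show pvBal (h :: a :: t2) = (if h then (1:Int) else -1) + pvBal (h :: t2) by
                    simp [pvBal, ha]]
              rw [h2]
              cases h <;> simp <;> push_cast <;> ring
        rw [hlin] at h0
        cases h <;> simp at h0 <;> omega
  · intro h; subst h; rfl

-- ===== VERDICT (by name: the statement is the Claim_ definition above) =====
theorem answer_spec : Claim_equal_answer := by
  intro stones _
  unfold Spec_answer answer answer_alt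
  have hA := answerLoop_eq stones 0 0
  have hB := altLoop_spec stones [] (by intro x hx; simp at hx)
  have hiff := pvBal_homog _ hB.1
  rw [hB.2] at hiff
  have hl : (stones.count "W" : Int) ≤ (stones.length : Int) := by
    exact_mod_cast List.count_le_length
  rw [hA]
  simp only [pvBal, zero_add] at hiff ⊢
  by_cases he : altLoop stones [] = []
  · have h0 : (0:Int) + 2 * (stones.count "W" : Int) - stones.length = 0 := by
      have := hiff.2 he; omega
    simp [he]
    omega
  · have h0 : ¬ ((0:Int) + 2 * (stones.count "W" : Int) - stones.length = 0) := by
      intro h; exact he (hiff.1 (by omega))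
    simp [he]
    omega
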